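-- pv_equiv track=rewrite | github.com/Lyxn/or-model | model/protein_folding.py | calc_offset
-- ===== SOURCE A (Python) =====
-- def calc_offset(num, folds):
--     offset = 1
--     min_offset = offset
--     is_left = 0
--     last = 0
--     for cur in folds:
--         length = cur - last
--         if is_left:
--             offset -= length - 1
--         else:
--             offset += length - 1
--         is_left = 1 - is_left
--         last = cur
--         if min_offset > offset:
--             min_offset = offset
--     if is_left:
--         length = num - last
--         offset -= length - 1
--     min_offset = 2 - min_offset if min_offset < 1 else 1
--     return min_offset
-- ===== SOURCE B (Python) =====
-- def calc_offset(num, folds):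
--     # pass 1: signed increments between consecutive folds (alternating sign)
--     incs = []
--     last, sign = 0, 1
--     for cur in folds:
--         incs.append(sign * (cur - last - 1))
--         sign, last = -sign, cur
--     # pass 2: running offsets starting at 1
--     offsets = [1]
--     acc = 1
--     for d in incs:
--         acc += d
--         offsets.append(acc)
--     m = min(offsets)
--     return 2 - m if m < 1 else 1
-- ===== Notes on version B (the rewrite author's own statement) =====
-- stated objective: simpler
-- what changed: Replaces A's single stateful loop (is_left flag, branch, inline running min, dead post-loop offset adjustment) by two plain passes: build the list of signed increments, then the list of running offsets, and take min() of it.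
import Mathlib
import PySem

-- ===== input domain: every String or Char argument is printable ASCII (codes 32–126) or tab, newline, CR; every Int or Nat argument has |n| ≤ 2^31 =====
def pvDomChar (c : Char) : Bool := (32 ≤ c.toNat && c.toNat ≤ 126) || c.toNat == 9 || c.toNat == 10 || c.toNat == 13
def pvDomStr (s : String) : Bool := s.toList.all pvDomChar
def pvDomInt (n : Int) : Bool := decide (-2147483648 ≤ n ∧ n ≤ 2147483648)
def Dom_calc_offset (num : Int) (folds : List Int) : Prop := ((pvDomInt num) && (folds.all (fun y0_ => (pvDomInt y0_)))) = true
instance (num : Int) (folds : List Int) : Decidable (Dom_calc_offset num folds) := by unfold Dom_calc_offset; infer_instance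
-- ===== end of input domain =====

-- B replaces A's stateful flag-and-branch loop with two plain passes (increments, then running offsets) and a final min(); simpler, same O(n) cost.

-- ===== PORT A =====
-- loop body of A, as a helper (state: offset, min_offset, is_left, last)
def stepA (st : Int × Int × Int × Int) (cur : Int) : Int × Int × Int × Int :=
  let offset := st.1; let min_offset := st.2.1; let is_left := st.2.2.1; let last := st.2.2.2
  let length := cur - last
  let offset := if is_left ≠ 0 then offset - (length - 1) else offset + (length - 1)
  let is_left := 1 - is_left
  let min_offset := if min_offset > offset then offset else min_offset
  (offset, min_offset, is_left, cur)

def calc_offset (num : Int) (folds : List Int) : Int :=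
  let s := folds.foldl stepA (1, 1, 0, 0)
  let min_offset := s.2.1; let is_left := s.2.2.1; let last := s.2.2.2
  -- post-loop adjustment of `offset` kept (unused for the return value, as in A)
  let _offset := if is_left ≠ 0 then s.1 - ((num - last) - 1) else s.1
  if min_offset < 1 then 2 - min_offset else 1

-- ===== PORT B =====
def calc_offset_alt (num : Int) (folds : List Int) : Int :=
  -- pass 1: signed increments
  let p1 := folds.foldl (fun (st : List Int × Int × Int) cur =>
      (st.1 ++ [st.2.2 * (cur - st.2.1 - 1)], cur, -st.2.2)) ([], 0, 1)
  let incs := p1.1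
  -- pass 2: running offsets starting at 1
  let p2 := incs.foldl (fun (st : List Int × Int) d =>
      let acc := st.2 + d
      (st.1 ++ [acc], acc)) ([1], 1)
  let m := (PySem.List.min? p2.1 (fun x => x)).getD 1
  if m < 1 then 2 - m else 1

-- ===== PRECONDITION & SPEC =====
def Spec_calc_offset (num : Int) (folds : List Int) (out : Int) : Prop := out = calc_offset_alt num folds
instance (num : Int) (folds : List Int) (out : Int) : Decidable (Spec_calc_offset num folds out) := by unfold Spec_calc_offset; infer_instance

-- ===== CLAIM (what is proved, stated in full; the proofs are below) =====
def Claim_equal_calc_offset : Prop := ∀ (num : Int) (folds : List Int), Dom_calc_offset num folds → Spec_calc_offset num folds (calc_offset num folds)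

-- ===== LEMMAS AND PROOFS =====

-- reference: minimum of the offset sequence starting at `off` (inclusive)
def scanMin (off sign last : Int) : List Int → Int
  | [] => off
  | c :: t => min off (scanMin (off + sign * (c - last - 1)) (-sign) c t)

lemma scanMin_le (off sign last : Int) (l : List Int) : scanMin off sign last l ≤ off := by
  cases l with
  | nil => simp [scanMin]
  | cons c t => simp [scanMin]

lemma lemA (l : List Int) : ∀ (off mn last isl : Int), (isl = 0 ∨ isl = 1) → mn ≤ off →
    (l.foldl stepA (off, mn, isl, last)).2.1 = min mn (scanMin off (1 - 2 * isl) last l) := by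
  induction l with
  | nil => intro off mn last isl _ hle; simp [scanMin]; omega
  | cons c t ih =>
    intro off mn last isl hisl hle
    rcases hisl with h | h <;> subst h <;>
      simp only [List.foldl_cons, scanMin, stepA] <;> norm_num
    · rw [ih (off + (c - last - 1)) _ c 1 (Or.inr rfl) (by split_ifs <;> omega)]
      have := scanMin_le (off + (c - last - 1)) (-1) c t
      norm_num
      simp only [min_def]; split_ifs <;> omega
    · rw [ih (off - (c - last - 1)) _ c 0 (Or.inl rfl) (by split_ifs <;> omega)]
      have := scanMin_le (off - (c - last - 1)) 1 c t
      have harg : off + (1 - (c - last)) = off - (c - last - 1) := by ring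
      norm_num [harg]
      simp only [min_def]; split_ifs <;> omega

-- B pass 1 produces the alternating-sign increment list
def incsList (sign last : Int) : List Int → List Int
  | [] => []
  | c :: t => sign * (c - last - 1) :: incsList (-sign) c t

lemma lemB1 (l : List Int) : ∀ (pre : List Int) (last sign : Int),
    (l.foldl (fun (st : List Int × Int × Int) cur =>
      (st.1 ++ [st.2.2 * (cur - st.2.1 - 1)], cur, -st.2.2)) (pre, last, sign)).1
    = pre ++ incsList sign last l := by
  induction l with
  | nil => intro pre last sign; simp [incsList]
  | cons c t ih => intro pre last sign; simp [incsList, ih]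

-- B pass 2 produces the running-offset list
def psums (acc : Int) : List Int → List Int
  | [] => []
  | d :: t => (acc + d) :: psums (acc + d) t

lemma lemB2 (incs : List Int) : ∀ (os : List Int) (acc : Int),
    (incs.foldl (fun (st : List Int × Int) d =>
      let acc := st.2 + d
      (st.1 ++ [acc], acc)) (os, acc)).1 = os ++ psums acc incs := by
  induction incs with
  | nil => intro os acc; simp [psums]
  | cons d t ih => intro os acc; simp [psums, ih]

lemma lemB3 (l : List Int) : ∀ (off sign last : Int),
    (psums off (incsList sign last l)).foldl min off = scanMin off sign last l := by
  induction l with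
  | nil => intro off sign last; simp [incsList, psums, scanMin]
  | cons c t ih =>
    intro off sign last
    simp only [incsList, psums, scanMin, List.foldl_cons]
    have key : ∀ (xs : List Int) (a b : Int), xs.foldl min (min a b) = min a (xs.foldl min b) := by
      intro xs
      induction xs with
      | nil => intro a b; rfl
      | cons x xs ih2 => intro a b; simp only [List.foldl_cons, min_assoc, ih2]
    rw [key, ih]

-- ===== VERDICT (by name: the statement is the Claim_ definition above) =====
theorem calc_offset_spec : Claim_equal_calc_offset := by
  intro num folds _
  unfold Spec_calc_offset calc_offset calc_offset_alt
  simp only [lemB1, List.nil_append, lemB2, List.singleton_append]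
  rw [lemA folds 1 1 0 0 (Or.inl rfl) le_rfl]
  rw [PySem.List.min?_id_cons, Option.getD_some]
  have h3 := lemB3 folds 1 1 0
  norm_num at h3 ⊢
  rw [h3]
  have := scanMin_le 1 1 0 folds
  simp only [min_def]
  split_ifs <;> omega
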